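-- pv_equiv track=rewrite | github.com/jason121301/Battleship-AI- | Project/player.py | convert_mouse_to_letternum
-- ===== SOURCE A (Python) =====
-- letter_cell_coordinates = {(range(190, 240), range(690, 740)): 'A', (range(240, 290), range(740, 790)): 'B',
--                            (range(290, 340), range(790, 840)): 'C', (range(340, 390), range(840, 890)): 'D',
--                            (range(390, 440), range(890, 940)): 'E', (range(440, 490), range(940, 990)): 'F',
--                            (range(490, 540), range(990, 1040)): 'G', (range(540, 591), range(1040, 1091)): 'H'}
--
-- number_cell_coordinates = {range(160, 210): '1', range(210, 260): '2', range(260, 310): '3',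
--                            range(310, 360): '4', range(360, 410): '5', range(410, 460): '6',
--                            range(460, 510): '7', range(510, 561): '8'}
--
-- def convert_mouse_to_letternum(mouse_x: int, mouse_y: int, placements: bool) -> str:
--     """Convert a mouse coordinate into the cell center where placements
--     determines which of the two grids it should convert it to."""
--     letter = None
--     number = None
--     for h_cell in letter_cell_coordinates:
--         if placements:
--             if mouse_x in h_cell[0]:
--                 letter = letter_cell_coordinates[h_cell]
--         else:
--             if mouse_x in h_cell[1]:
--                 letter = letter_cell_coordinates[h_cell]
--     for v_cell in number_cell_coordinates:
--         if mouse_y in v_cell: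
--             number = number_cell_coordinates[v_cell]
--     return letter + number
-- ===== SOURCE B (Python) =====
-- def convert_mouse_to_letternum(mouse_x: int, mouse_y: int, placements: bool) -> str:
--     """Closed-form bin arithmetic instead of scanning the range-keyed dicts."""
--     x0 = 190 if placements else 690
--     letter = "ABCDEFGH"[min((mouse_x - x0) // 50, 7)] if x0 <= mouse_x <= x0 + 400 else None
--     number = "12345678"[min((mouse_y - 160) // 50, 7)] if 160 <= mouse_y <= 560 else None
--     return letter + number
-- ===== Notes on version B (the rewrite author's own statement) =====
-- stated objective: simpler
-- what changed: Replaces A's scans over the two range-keyed dictionaries with closed-form bin arithmetic: the cell index is min((coord - origin)//50, 7) under an in-grid guard, indexing into 'ABCDEFGH'/'12345678'.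
import Mathlib
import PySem

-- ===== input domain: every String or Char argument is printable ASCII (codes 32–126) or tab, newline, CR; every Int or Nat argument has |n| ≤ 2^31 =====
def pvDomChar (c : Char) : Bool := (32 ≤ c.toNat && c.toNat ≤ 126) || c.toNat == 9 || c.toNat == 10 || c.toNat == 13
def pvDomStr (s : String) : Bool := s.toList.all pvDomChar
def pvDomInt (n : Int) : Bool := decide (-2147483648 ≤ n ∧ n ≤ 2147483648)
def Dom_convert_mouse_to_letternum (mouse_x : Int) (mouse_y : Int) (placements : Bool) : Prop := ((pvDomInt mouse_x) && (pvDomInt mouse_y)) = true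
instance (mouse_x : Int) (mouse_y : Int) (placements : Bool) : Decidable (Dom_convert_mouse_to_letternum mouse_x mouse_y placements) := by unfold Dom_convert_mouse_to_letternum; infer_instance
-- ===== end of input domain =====

-- B replaces A's scan over the range-keyed dicts by closed-form bin arithmetic (objective: simpler).

-- ===== PORT A =====
-- the dict letter_cell_coordinates: ((x-range for placements), (x-range otherwise), letter)
def pvLetterTable : List ((Int × Int) × (Int × Int) × Char) :=
  [((190, 240), (690, 740), 'A'), ((240, 290), (740, 790), 'B'),
   ((290, 340), (790, 840), 'C'), ((340, 390), (840, 890), 'D'),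
   ((390, 440), (890, 940), 'E'), ((440, 490), (940, 990), 'F'),
   ((490, 540), (990, 1040), 'G'), ((540, 591), (1040, 1091), 'H')]

-- the dict number_cell_coordinates
def pvNumberTable : List ((Int × Int) × Char) :=
  [((160, 210), '1'), ((210, 260), '2'), ((260, 310), '3'), ((310, 360), '4'),
   ((360, 410), '5'), ((410, 460), '6'), ((460, 510), '7'), ((510, 561), '8')]

def pvALetter (mouse_x : Int) (placements : Bool) : Option Char :=
  pvLetterTable.foldl (fun st e =>
    if placements then
      (if e.1.1 ≤ mouse_x ∧ mouse_x < e.1.2 then some e.2.2 else st)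
    else
      (if e.2.1.1 ≤ mouse_x ∧ mouse_x < e.2.1.2 then some e.2.2 else st)) none

def pvANumber (mouse_y : Int) : Option Char :=
  pvNumberTable.foldl (fun st e =>
    if e.1.1 ≤ mouse_y ∧ mouse_y < e.1.2 then some e.2 else st) none

def convert_mouse_to_letternum (mouse_x : Int) (mouse_y : Int) (placements : Bool) : String :=
  match pvALetter mouse_x placements, pvANumber mouse_y with
  | some l, some n => String.ofList [l, n]   -- letter + number
  | _, _ => ""                           -- Python raises TypeError (None + str); excluded by Pre_

-- ===== PORT B =====
def pvBLetter (mouse_x : Int) (placements : Bool) : Option Char :=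
  let x0 : Int := if placements then 190 else 690
  if x0 ≤ mouse_x ∧ mouse_x ≤ x0 + 400 then
    PySem.Str.pyGet? "ABCDEFGH" (min (PySem.Int.floordiv (mouse_x - x0) 50) 7)
  else none

def pvBNumber (mouse_y : Int) : Option Char :=
  if (160 : Int) ≤ mouse_y ∧ mouse_y ≤ 560 then
    PySem.Str.pyGet? "12345678" (min (PySem.Int.floordiv (mouse_y - 160) 50) 7)
  else none

def convert_mouse_to_letternum_alt (mouse_x : Int) (mouse_y : Int) (placements : Bool) : String :=
  -- letter + number; on a None (out-of-grid coordinate) Python raises TypeError: excluded by Pre_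
  match pvBLetter mouse_x placements with
  | none => ""
  | some l =>
    match pvBNumber mouse_y with
    | none => ""
    | some n => String.ofList [l, n]

-- ===== PRECONDITION & SPEC =====
-- Pre_ excludes exactly the out-of-grid coordinates, on which BOTH A and B raise TypeError (None + str).
def Pre_convert_mouse_to_letternum (mouse_x : Int) (mouse_y : Int) (placements : Bool) : Prop :=
  (if placements then 190 ≤ mouse_x ∧ mouse_x ≤ 590 else 690 ≤ mouse_x ∧ mouse_x ≤ 1090)
  ∧ 160 ≤ mouse_y ∧ mouse_y ≤ 560
instance (mouse_x : Int) (mouse_y : Int) (placements : Bool) : Decidable (Pre_convert_mouse_to_letternum mouse_x mouse_y placements) := by unfold Pre_convert_mouse_to_letternum; infer_instance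

def pvWitness_convert_mouse_to_letternum : Int × Int × Bool := (555, 300, true)

def Spec_convert_mouse_to_letternum (mouse_x : Int) (mouse_y : Int) (placements : Bool) (out : String) : Prop := out = convert_mouse_to_letternum_alt mouse_x mouse_y placements
instance (mouse_x : Int) (mouse_y : Int) (placements : Bool) (out : String) : Decidable (Spec_convert_mouse_to_letternum mouse_x mouse_y placements out) := by unfold Spec_convert_mouse_to_letternum; infer_instance

-- ===== CLAIM (what is proved, stated in full; the proofs are below) =====
def Claim_equal_convert_mouse_to_letternum : Prop := ∀ (mouse_x : Int) (mouse_y : Int) (placements : Bool), Dom_convert_mouse_to_letternum mouse_x mouse_y placements → Pre_convert_mouse_to_letternum mouse_x mouse_y placements → Spec_convert_mouse_to_letternum mouse_x mouse_y placements (convert_mouse_to_letternum mouse_x mouse_y placements)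

-- ===== LEMMAS AND PROOFS =====
set_option maxRecDepth 40000 in
theorem pvLetter_eq_true : ∀ n : Nat, n < 401 →
    pvALetter (190 + (n : Int)) true = pvBLetter (190 + (n : Int)) true := by decide

set_option maxRecDepth 40000 in
theorem pvLetter_eq_false : ∀ n : Nat, n < 401 →
    pvALetter (690 + (n : Int)) false = pvBLetter (690 + (n : Int)) false := by decide

set_option maxRecDepth 40000 in
theorem pvNumber_eq : ∀ n : Nat, n < 401 →
    pvANumber (160 + (n : Int)) = pvBNumber (160 + (n : Int)) := by decide

theorem pvLetter_eq (x : Int) (p : Bool)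
    (h : if p then 190 ≤ x ∧ x ≤ 590 else 690 ≤ x ∧ x ≤ 1090) :
    pvALetter x p = pvBLetter x p := by
  cases p with
  | true =>
    rw [if_pos rfl] at h
    have hx : x = 190 + ((x - 190).toNat : Int) := by omega
    have hn : (x - 190).toNat < 401 := by omega
    rw [hx]; exact pvLetter_eq_true _ hn
  | false =>
    rw [if_neg (by simp)] at h
    have hx : x = 690 + ((x - 690).toNat : Int) := by omega
    have hn : (x - 690).toNat < 401 := by omega
    rw [hx]; exact pvLetter_eq_false _ hn

theorem pvNumber_eq' (y : Int) (h : 160 ≤ y ∧ y ≤ 560) :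
    pvANumber y = pvBNumber y := by
  have hy : y = 160 + ((y - 160).toNat : Int) := by omega
  have hn : (y - 160).toNat < 401 := by omega
  rw [hy]; exact pvNumber_eq _ hn

-- ===== VERDICT (by name: the statement is the Claim_ definition above) =====
theorem convert_mouse_to_letternum_spec : Claim_equal_convert_mouse_to_letternum := by
  intro x y p _ hpre
  obtain ⟨hx, hy1, hy2⟩ := hpre
  unfold Spec_convert_mouse_to_letternum convert_mouse_to_letternum convert_mouse_to_letternum_alt
  rw [pvLetter_eq x p hx, pvNumber_eq' y ⟨hy1, hy2⟩]
  cases pvBLetter x p <;> cases pvBNumber y <;> rfl
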